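-- pv_equiv track=rewrite | github.com/kun709/image_viewer | util.py | str_sum
-- ===== SOURCE A (Python) =====
-- def str_sum(x, size=15):
--     result = 0
--     for x_ in x:
--         x_ = ord(x_)
--         result *= 10
--         if 47 < x_ < 58:  # digit 10 ~ 19
--             result += x_ - 38
--         elif 64 < x_ < 91:  # large 0 ~ 25
--             result += x_ - 65
--         elif 96 < x_ < 123:  # small 0 ~ 25
--             result += x_ - 97
--     return result
-- ===== SOURCE B (Python) =====
-- def _val(o):
--     if 47 < o < 58:
--         return o - 38
--     if 64 < o < 91:
--         return o - 65
--     if 96 < o < 123: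
--         return o - 97
--     return 0
--
-- def str_sum(x, size=15):
--     result = 0
--     place = 1
--     for c in reversed(x):
--         result += _val(ord(c)) * place
--         place *= 10
--     return result
-- ===== Notes on version B (the rewrite author's own statement) =====
-- stated objective: alternative
-- what changed: B replaces A's left-to-right Horner rescaling (result *= 10 each step) by a right-to-left accumulation of value(char) * place with a running place value multiplied by 10 per character, via a _val helper.
import Mathlib
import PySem

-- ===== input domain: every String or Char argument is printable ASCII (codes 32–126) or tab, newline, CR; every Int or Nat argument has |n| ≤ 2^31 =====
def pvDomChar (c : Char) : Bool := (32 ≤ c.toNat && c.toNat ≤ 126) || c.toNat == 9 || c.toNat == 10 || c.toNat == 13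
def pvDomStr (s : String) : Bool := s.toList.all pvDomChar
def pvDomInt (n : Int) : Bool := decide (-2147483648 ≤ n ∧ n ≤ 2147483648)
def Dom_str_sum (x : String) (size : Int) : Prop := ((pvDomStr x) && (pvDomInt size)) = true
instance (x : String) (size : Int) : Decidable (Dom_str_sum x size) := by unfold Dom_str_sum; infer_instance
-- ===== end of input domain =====

-- ===== PORT A =====
-- B replaces A's left-to-right Horner rescale by a reversed accumulation with a running place value (alternative decomposition; return value only).
def str_sum (x : String) (size : Int) : Int :=
  x.toList.foldl (fun result c =>
    let o : Int := c.toNat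
    let result := result * 10
    if 47 < o ∧ o < 58 then result + (o - 38)
    else if 64 < o ∧ o < 91 then result + (o - 65)
    else if 96 < o ∧ o < 123 then result + (o - 97)
    else result) 0

-- ===== PORT B =====
def pvVal (o : Int) : Int :=
  if 47 < o ∧ o < 58 then o - 38
  else if 64 < o ∧ o < 91 then o - 65
  else if 96 < o ∧ o < 123 then o - 97
  else 0

def str_sum_alt (x : String) (size : Int) : Int :=
  (x.toList.reverse.foldl (fun (s : Int × Int) c =>
    (s.1 + pvVal (c.toNat) * s.2, s.2 * 10)) (0, 1)).1

-- ===== PRECONDITION & SPEC =====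
def Spec_str_sum (x : String) (size : Int) (out : Int) : Prop := out = str_sum_alt x size
instance (x : String) (size : Int) (out : Int) : Decidable (Spec_str_sum x size out) := by unfold Spec_str_sum; infer_instance

-- ===== CLAIM (what is proved, stated in full; the proofs are below) =====
def Claim_equal_str_sum : Prop := ∀ (x : String) (size : Int), Dom_str_sum x size → Spec_str_sum x size (str_sum x size)

-- ===== LEMMAS AND PROOFS =====

def pvStep : Int × Int → Char → Int × Int :=
  fun s c => (s.1 + pvVal (c.toNat) * s.2, s.2 * 10)

def pvHorner : Int → Char → Int :=
  fun result c =>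
    let o : Int := c.toNat
    let result := result * 10
    if 47 < o ∧ o < 58 then result + (o - 38)
    else if 64 < o ∧ o < 91 then result + (o - 65)
    else if 96 < o ∧ o < 123 then result + (o - 97)
    else result

theorem pvHorner_eq (r : Int) (c : Char) : pvHorner r c = r * 10 + pvVal (c.toNat) := by
  simp only [pvHorner, pvVal]
  split_ifs <;> ring

theorem pvHorner_shift (l : List Char) (r : Int) :
    l.foldl pvHorner r = r * 10 ^ l.length + l.foldl pvHorner 0 := by
  induction l generalizing r with
  | nil => simp
  | cons a t ih =>
    simp only [List.foldl_cons, List.length_cons]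
    rw [ih (pvHorner r a), ih (pvHorner 0 a), pvHorner_eq, pvHorner_eq]
    ring

theorem pvStep_rev (l : List Char) :
    l.reverse.foldl pvStep (0, 1) = (l.foldl pvHorner 0, (10 : Int) ^ l.length) := by
  induction l with
  | nil => simp
  | cons a t ih =>
    simp only [List.reverse_cons, List.foldl_append, ih, List.foldl_cons, List.foldl_nil,
      List.length_cons, pvStep]
    rw [pvHorner_shift t (pvHorner 0 a), pvHorner_eq]
    refine Prod.ext ?_ ?_ <;> simp <;> ring

-- ===== VERDICT (by name: the statement is the Claim_ definition above) =====
theorem str_sum_spec : Claim_equal_str_sum := by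
  intro x size _
  show str_sum x size = str_sum_alt x size
  unfold str_sum str_sum_alt
  rw [show (fun (s : Int × Int) c => (s.1 + pvVal (c.toNat) * s.2, s.2 * 10)) = pvStep from rfl,
    pvStep_rev,
    show (fun (result : Int) c =>
      let o : Int := c.toNat
      let result := result * 10
      if 47 < o ∧ o < 58 then result + (o - 38)
      else if 64 < o ∧ o < 91 then result + (o - 65)
      else if 96 < o ∧ o < 123 then result + (o - 97)
      else result) = pvHorner from rfl]
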